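-- pv_equiv track=rewrite | github.com/wgxli/chinese-text-analyzer | client.py | limit_length
-- ===== SOURCE A (Python) =====
-- meaning_limit = 60
--
-- def limit_length(definitions, limit=meaning_limit):
--     """
--     Returns an initial sublist (prefix) of `definitions` as long as possible
--     without exceeding `limit` characters total.
--     """
--     output = []
--     length = 0
--     for entry in definitions:
--         length += len(entry)
--         if length > limit: break
--         output.append(entry)
--     return output
-- ===== SOURCE B (Python) =====
-- from itertools import accumulate
--
-- meaning_limit = 60
--
-- def limit_length(definitions, limit=meaning_limit):
--     """Prefix-sum formulation: cut at the first cumulative length exceeding limit."""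
--     acc = list(accumulate(len(e) for e in definitions))
--     cutoff = next((i for i, s in enumerate(acc) if s > limit), len(acc))
--     return definitions[:cutoff]
-- ===== Notes on version B (the rewrite author's own statement) =====
-- stated objective: alternative
-- what changed: B computes the cumulative lengths with itertools.accumulate, finds the first index whose prefix sum exceeds the limit, and slices, instead of A's accumulate-append-break loop.
import Mathlib
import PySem

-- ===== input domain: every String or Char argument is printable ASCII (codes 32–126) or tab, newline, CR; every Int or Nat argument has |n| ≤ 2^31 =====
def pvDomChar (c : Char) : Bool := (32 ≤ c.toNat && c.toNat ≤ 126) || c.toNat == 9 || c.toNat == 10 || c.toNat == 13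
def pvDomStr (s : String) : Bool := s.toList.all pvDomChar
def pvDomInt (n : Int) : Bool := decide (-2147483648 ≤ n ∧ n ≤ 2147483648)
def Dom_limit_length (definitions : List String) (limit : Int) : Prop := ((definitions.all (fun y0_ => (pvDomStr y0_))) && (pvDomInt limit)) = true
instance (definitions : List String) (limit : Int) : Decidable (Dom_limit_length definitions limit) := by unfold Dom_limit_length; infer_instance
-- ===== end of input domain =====

-- B: prefix sums + first-overflow cutoff + slice, instead of A's append/break loop (alternative decomposition).
-- ===== PORT A =====
-- for-loop with break: recursion over the list carrying (output, length)
def limit_length_loop (defs : List String) (limit : Int) (output : List String) (length : Int) :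
    List String :=
  match defs with
  | [] => output
  | entry :: rest =>
    let length := length + PySem.Str.len entry
    if length > limit then output
    else limit_length_loop rest limit (output ++ [entry]) length

def limit_length (definitions : List String) (limit : Int) : List String :=
  limit_length_loop definitions limit [] 0

-- ===== PORT B =====
-- itertools.accumulate over the lengths (running prefix sums starting at s)
def limit_length_accum (lens : List Int) (s : Int) : List Int :=
  match lens with
  | [] => []
  | x :: xs => (s + x) :: limit_length_accum xs (s + x)

def limit_length_alt (definitions : List String) (limit : Int) : List String :=
  let acc := limit_length_accum (definitions.map (fun e => PySem.Str.len e)) 0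
  let cutoff := match acc.findIdx? (fun v => decide (v > limit)) with
    | some i => i
    | none => acc.length
  definitions.take cutoff

-- ===== PRECONDITION & SPEC =====
def Spec_limit_length (definitions : List String) (limit : Int) (out : List String) : Prop := out = limit_length_alt definitions limit
instance (definitions : List String) (limit : Int) (out : List String) : Decidable (Spec_limit_length definitions limit out) := by unfold Spec_limit_length; infer_instance

-- ===== CLAIM (what is proved, stated in full; the proofs are below) =====
def Claim_equal_limit_length : Prop := ∀ (definitions : List String) (limit : Int), Dom_limit_length definitions limit → Spec_limit_length definitions limit (limit_length definitions limit)

-- ===== LEMMAS AND PROOFS =====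
def pvCut (acc : List Int) (limit : Int) : Nat :=
  match acc.findIdx? (fun v => decide (v > limit)) with
  | some i => i
  | none => acc.length

lemma pvCut_cons (x : Int) (xs : List Int) (limit : Int) :
    pvCut (x :: xs) limit = if x > limit then 0 else pvCut xs limit + 1 := by
  unfold pvCut
  rw [List.findIdx?_cons]
  by_cases h : x > limit
  · simp [h]
  · simp only [h, decide_false, Bool.false_eq_true, ite_false]
    cases xs.findIdx? (fun v => decide (v > limit)) <;> simp

lemma limit_length_key (limit : Int) :
    ∀ (defs : List String) (output : List String) (s : Int),
      limit_length_loop defs limit output s =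
        output ++ defs.take (pvCut (limit_length_accum (defs.map (fun e => PySem.Str.len e)) s) limit) := by
  intro defs
  induction defs with
  | nil => intro output s; simp [limit_length_loop, limit_length_accum, pvCut]
  | cons d ds ih =>
    intro output s
    simp only [limit_length_loop, limit_length_accum, List.map_cons, pvCut_cons]
    split_ifs with h
    · simp
    · rw [ih]
      simp

-- ===== VERDICT (by name: the statement is the Claim_ definition above) =====
theorem limit_length_spec : Claim_equal_limit_length := by
  intro definitions limit _
  unfold Spec_limit_length limit_length limit_length_alt
  rw [limit_length_key]
  simp [pvCut]
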